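-- pv_equiv track=rewrite | github.com/MrBrantCode/unitest_baseline | mut_generate/mist_train_taco/taco_6463/solution.py | min_flips_to_beautiful_crayons
-- ===== SOURCE A (Python) =====
-- def min_flips_to_beautiful_crayons(test_cases):
--     results = []
--
--     for s in test_cases:
--         u = []
--         d = []
--         nu = 0
--         nd = 0
--
--         for c in s:
--             if c == 'U':
--                 nu += 1
--                 if nd > 0:
--                     d.append(nd)
--                     nd = 0
--             else:
--                 nd += 1
--                 if nu > 0:
--                     u.append(nu)
--                     nu = 0
--
--         if nu > 0:
--             u.append(nu)
--         elif nd > 0: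
--             d.append(nd)
--
--         results.append(min(len(u), len(d)))
--
--     return results
-- ===== SOURCE B (Python) =====
-- def min_flips_to_beautiful_crayons(test_cases):
--     results = []
--     for s in test_cases:
--         t = 0
--         for x, y in zip(s, s[1:]):
--             if (x == 'U') != (y == 'U'):
--                 t += 1
--         results.append((t + 1) // 2 if s else 0)
--     return results
-- ===== Notes on version B (the rewrite author's own statement) =====
-- stated objective: simpler
-- what changed: Instead of maintaining two run-length lists and taking the min of their lengths, B counts adjacent U/non-U transitions t in one pass and returns (t+1)//2 per string (0 for empty), using the fact that U-runs and D-runs alternate so min(#U-runs,#D-runs) = floor(total_runs/2).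
import Mathlib
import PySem

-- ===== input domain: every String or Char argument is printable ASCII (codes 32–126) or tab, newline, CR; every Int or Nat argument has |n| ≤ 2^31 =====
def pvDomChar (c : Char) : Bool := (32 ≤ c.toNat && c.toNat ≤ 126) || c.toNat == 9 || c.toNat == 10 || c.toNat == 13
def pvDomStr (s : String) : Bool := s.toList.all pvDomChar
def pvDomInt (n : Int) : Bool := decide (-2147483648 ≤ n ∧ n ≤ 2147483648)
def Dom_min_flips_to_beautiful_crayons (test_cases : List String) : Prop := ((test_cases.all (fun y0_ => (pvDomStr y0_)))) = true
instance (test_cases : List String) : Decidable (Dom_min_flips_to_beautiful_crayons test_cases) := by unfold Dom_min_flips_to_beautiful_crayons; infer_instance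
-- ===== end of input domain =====

-- B replaces A's two run-length lists (and min of their lengths) by a single adjacent-transition
-- count t per string, returning (t+1)//2 (0 for the empty string); objective: simpler.

-- ===== PORT A =====
-- the inner 'for c in s' loop of A, state (u, d, nu, nd)
def pvALoop : List Char → List Int → List Int → Int → Int → List Int × List Int × Int × Int
  | [], u, d, nu, nd => (u, d, nu, nd)
  | c :: cs, u, d, nu, nd =>
    if c == 'U' then
      if nd > 0 then pvALoop cs u (d ++ [nd]) (nu + 1) 0
      else pvALoop cs u d (nu + 1) nd
    else
      if nu > 0 then pvALoop cs (u ++ [nu]) d 0 (nd + 1)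
      else pvALoop cs u d nu (nd + 1)

-- A's code after the inner loop: close the open run, then min(len(u), len(d))
def pvAFinish (r : List Int × List Int × Int × Int) : Int :=
  let (u, d, nu, nd) := r
  let (u', d') := if nu > 0 then (u ++ [nu], d) else if nd > 0 then (u, d ++ [nd]) else (u, d)
  min (u'.length : Int) (d'.length : Int)

def pvAOne (s : String) : Int := pvAFinish (pvALoop s.toList [] [] 0 0)

def min_flips_to_beautiful_crayons (test_cases : List String) : List Int :=
  test_cases.foldl (fun results s => results ++ [pvAOne s]) []

-- ===== PORT B =====
-- per string: t = number of adjacent pairs with differing (c == 'U') flag; answer (t+1)//2, 0 if empty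
def pvBOne (s : String) : Int :=
  let t : Int := (s.toList.zip (s.toList.drop 1)).foldl
    (fun t p => if (p.1 == 'U') != (p.2 == 'U') then t + 1 else t) 0
  if s.toList.isEmpty then 0 else PySem.Int.floordiv (t + 1) 2

def min_flips_to_beautiful_crayons_alt (test_cases : List String) : List Int :=
  test_cases.map pvBOne

-- ===== PRECONDITION & SPEC =====
def Spec_min_flips_to_beautiful_crayons (test_cases : List String) (out : List Int) : Prop := out = min_flips_to_beautiful_crayons_alt test_cases
instance (test_cases : List String) (out : List Int) : Decidable (Spec_min_flips_to_beautiful_crayons test_cases out) := by unfold Spec_min_flips_to_beautiful_crayons; infer_instance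

-- ===== CLAIM (what is proved, stated in full; the proofs are below) =====
def Claim_equal_min_flips_to_beautiful_crayons : Prop := ∀ (test_cases : List String), Dom_min_flips_to_beautiful_crayons test_cases → Spec_min_flips_to_beautiful_crayons test_cases (min_flips_to_beautiful_crayons test_cases)

-- ===== LEMMAS AND PROOFS =====

-- number of runs of an open run of flag p followed by the flag list bs
def pvRuns : Option Bool → List Bool → Nat
  | none, [] => 0
  | none, x :: xs => pvRuns (some x) xs
  | some _, [] => 1
  | some p, x :: xs => if x = p then pvRuns (some p) xs else 1 + pvRuns (some x) xs

-- number of adjacent differing pairs in a flag list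
def pvTrans : List Bool → Nat
  | [] => 0
  | [_] => 0
  | x :: y :: xs => (if x = y then 0 else 1) + pvTrans (y :: xs)

def pvFlagOf (nu nd : Int) : Option Bool :=
  if 0 < nu then some true else if 0 < nd then some false else none

-- alternation invariant on the completed-run counts relative to the open run's flag
def pvInv : Option Bool → Nat → Nat → Prop
  | none, a, b => a = 0 ∧ b = 0
  | some true, a, b => b = a ∨ b = a + 1
  | some false, a, b => a = b ∨ a = b + 1

lemma pvA_main : ∀ (cs : List Char) (u d : List Int) (nu nd : Int),
    0 ≤ nu → 0 ≤ nd → (0 < nu → nd = 0) → (0 < nd → nu = 0) →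
    pvInv (pvFlagOf nu nd) u.length d.length →
    pvAFinish (pvALoop cs u d nu nd) =
      (((u.length + d.length + pvRuns (pvFlagOf nu nd) (cs.map (· == 'U'))) / 2 : Nat) : Int) := by
  intro cs
  induction cs with
  | nil =>
    intro u d nu nd hnu hnd hx1 hx2 hinv
    by_cases h1 : 0 < nu
    · have hf : pvFlagOf nu nd = some true := by unfold pvFlagOf; rw [if_pos (by omega)]
      rw [hf] at hinv; simp only [pvInv] at hinv
      simp only [pvALoop, pvAFinish, hf, List.map_nil, pvRuns]
      rw [if_pos h1]
      simp only [List.length_append, List.length_cons, List.length_nil]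
      omega
    · by_cases h2 : 0 < nd
      · have hf : pvFlagOf nu nd = some false := by unfold pvFlagOf; rw [if_neg (by omega), if_pos (by omega)]
        rw [hf] at hinv; simp only [pvInv] at hinv
        simp only [pvALoop, pvAFinish, hf, List.map_nil, pvRuns]
        rw [if_neg (by omega), if_pos h2]
        simp only [List.length_append, List.length_cons, List.length_nil]
        omega
      · have hf : pvFlagOf nu nd = none := by unfold pvFlagOf; rw [if_neg (by omega), if_neg (by omega)]
        rw [hf] at hinv; simp only [pvInv] at hinv
        simp only [pvALoop, pvAFinish, hf, List.map_nil, pvRuns]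
        rw [if_neg (by omega), if_neg (by omega)]
        dsimp only
        omega
  | cons c cs ih =>
    intro u d nu nd hnu hnd hx1 hx2 hinv
    simp only [pvALoop, List.map_cons]
    by_cases hc : (c == 'U') = true
    · rw [if_pos hc]
      simp only [hc]
      by_cases hd : nd > 0
      · -- close a D-run, open U
        rw [if_pos hd]
        have hnu0 : nu = 0 := hx2 hd
        have hf : pvFlagOf nu nd = some false := by unfold pvFlagOf; rw [if_neg (by omega), if_pos (by omega)]
        have hf' : pvFlagOf (nu + 1) 0 = some true := by unfold pvFlagOf; rw [if_pos (by omega)]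
        rw [hf] at hinv; simp only [pvInv] at hinv
        rw [ih _ _ _ _ (by omega) (by omega) (by omega) (by omega)
          (by rw [hf']; simp only [pvInv, List.length_append, List.length_cons,
              List.length_nil]; omega)]
        rw [hf, hf']
        simp only [pvRuns, List.length_append, List.length_cons, List.length_nil,
          Bool.true_eq_false, if_false]
        omega
      · rw [if_neg hd]
        have hnd0 : nd = 0 := by omega
        have hf' : pvFlagOf (nu + 1) nd = some true := by unfold pvFlagOf; rw [if_pos (by omega)]
        by_cases hu : 0 < nu
        · have hf : pvFlagOf nu nd = some true := by unfold pvFlagOf; rw [if_pos (by omega)]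
          rw [hf] at hinv
          rw [ih _ _ _ _ (by omega) (by omega) (by omega) (by omega)
            (by rw [hf']; exact hinv)]
          rw [hf, hf']
          simp [pvRuns]
        · have hf : pvFlagOf nu nd = none := by unfold pvFlagOf; rw [if_neg (by omega), if_neg (by omega)]
          rw [hf] at hinv; simp only [pvInv] at hinv
          rw [ih _ _ _ _ (by omega) (by omega) (by omega) (by omega)
            (by rw [hf']; simp only [pvInv]; omega)]
          rw [hf, hf']
          simp [pvRuns]
    · rw [if_neg (by simpa using hc)]
      have hcf : (c == 'U') = false := by simpa using hc
      simp only [hcf]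
      by_cases hu : nu > 0
      · -- close a U-run, open D
        rw [if_pos hu]
        have hnd0 : nd = 0 := hx1 hu
        have hf : pvFlagOf nu nd = some true := by unfold pvFlagOf; rw [if_pos (by omega)]
        have hf' : pvFlagOf 0 (nd + 1) = some false := by unfold pvFlagOf; rw [if_neg (by omega), if_pos (by omega)]
        rw [hf] at hinv; simp only [pvInv] at hinv
        rw [ih _ _ _ _ (by omega) (by omega) (by omega) (by omega)
          (by rw [hf']; simp only [pvInv, List.length_append, List.length_cons,
              List.length_nil]; omega)]
        rw [hf, hf']
        simp only [pvRuns, List.length_append, List.length_cons, List.length_nil,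
          Bool.false_eq_true, if_false]
        omega
      · rw [if_neg hu]
        have hnu0 : nu = 0 := by omega
        have hf' : pvFlagOf nu (nd + 1) = some false := by unfold pvFlagOf; rw [if_neg (by omega), if_pos (by omega)]
        by_cases hd : 0 < nd
        · have hf : pvFlagOf nu nd = some false := by unfold pvFlagOf; rw [if_neg (by omega), if_pos (by omega)]
          rw [hf] at hinv
          rw [ih _ _ _ _ (by omega) (by omega) (by omega) (by omega)
            (by rw [hf']; exact hinv)]
          rw [hf, hf']
          simp [pvRuns]
        · have hf : pvFlagOf nu nd = none := by unfold pvFlagOf; rw [if_neg (by omega), if_neg (by omega)]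
          rw [hf] at hinv; simp only [pvInv] at hinv
          rw [ih _ _ _ _ (by omega) (by omega) (by omega) (by omega)
            (by rw [hf']; simp only [pvInv]; omega)]
          rw [hf, hf']
          simp [pvRuns]

lemma pvRuns_trans : ∀ (xs : List Bool) (x : Bool),
    pvRuns (some x) xs = 1 + pvTrans (x :: xs) := by
  intro xs
  induction xs with
  | nil => intro x; simp [pvRuns, pvTrans]
  | cons y ys ih =>
    intro x
    simp only [pvRuns, pvTrans]
    by_cases h : y = x
    · subst h; simp [ih y]
    · simp [h, Ne.symm h, ih y]

lemma pvB_zip : ∀ (cs : List Char) (t : Int),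
    ((cs.zip (cs.drop 1)).foldl
      (fun t p => if (p.1 == 'U') != (p.2 == 'U') then t + 1 else t) t) =
    t + (pvTrans (cs.map (· == 'U')) : Int) := by
  intro cs
  induction cs with
  | nil => intro t; simp [pvTrans]
  | cons x xs ih =>
    intro t
    cases xs with
    | nil => simp [pvTrans]
    | cons y ys =>
      simp only [List.drop_succ_cons, List.drop_zero, List.zip_cons_cons, List.foldl_cons] at ih ⊢
      rw [ih]
      simp only [List.map_cons, pvTrans]
      by_cases h : (x == 'U') = (y == 'U')
      · simp [h]
      · simp [h]
        omega

lemma pvOne_eq (s : String) : pvAOne s = pvBOne s := by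
  unfold pvAOne pvBOne
  rw [pvA_main s.toList [] [] 0 0 le_rfl le_rfl (by omega) (by omega)
    (by simp [pvFlagOf, pvInv])]
  rw [pvB_zip]
  cases hs : s.toList with
  | nil => simp [pvFlagOf, pvRuns]
  | cons x xs =>
    have hflag : pvFlagOf 0 0 = none := by simp [pvFlagOf]
    rw [hflag]
    simp only [List.isEmpty_cons, Bool.false_eq_true, if_false, List.map_cons, pvRuns,
      List.length_nil]
    rw [pvRuns_trans]
    rw [PySem.Int.floordiv_eq_ediv_of_pos (by norm_num)]
    omega

lemma pvFoldl_append (l : List String) (acc : List Int) :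
    l.foldl (fun results s => results ++ [pvAOne s]) acc = acc ++ l.map pvAOne := by
  induction l generalizing acc with
  | nil => simp
  | cons x xs ih => simp [List.foldl, ih]

-- ===== VERDICT (by name: the statement is the Claim_ definition above) =====
theorem min_flips_to_beautiful_crayons_spec : Claim_equal_min_flips_to_beautiful_crayons := by
  intro tcs _
  unfold Spec_min_flips_to_beautiful_crayons min_flips_to_beautiful_crayons
    min_flips_to_beautiful_crayons_alt
  rw [pvFoldl_append]
  simp [List.map_congr_left fun s _ => pvOne_eq s]
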